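-- pv_equiv track=rewrite | github.com/ineskab/Encryption | dict_inteterdiff.py | dict_interdiff
-- ===== SOURCE A (Python) =====
-- def f(a, b):
--     return a + b
--
-- def dict_interdiff(d1, d2):
--     '''
--     d1, d2: dicts whose keys and values are integers
--     Returns a tuple of dictionaries according to the instructions above
--     '''
--     d_intersect = {}
--     d_diff = {}
--
--     intersection = d1.keys() & d2.keys()
--
--     for k in intersection:
--         d_intersect[k] = f(d1[k], d2[k])
--
--     diff1 = { k : d2[k] for k in set(d2) - set(d1) }
--     diff2 = { k : d1[k] for k in set(d1) - set(d2) }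
--
--
--     d_diff = {**diff1, **diff2}
--
--     return(d_intersect, d_diff)
-- ===== SOURCE B (Python) =====
-- def dict_interdiff(d1, d2):
--     # Accumulate one summed dict and a key-multiplicity counter over both inputs,
--     # then partition by multiplicity: count 2 -> intersection (already summed), count 1 -> difference.
--     total = {}
--     cnt = {}
--     for d in (d2, d1):
--         for k, v in d.items():
--             total[k] = total.get(k, 0) + v
--             cnt[k] = cnt.get(k, 0) + 1
--     d_intersect = {k: total[k] for k in d1 if cnt[k] == 2}
--     d_diff = {k: v for k, v in total.items() if cnt[k] == 1}
--     return (d_intersect, d_diff)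
-- ===== Notes on version B (the rewrite author's own statement) =====
-- stated objective: alternative
-- what changed: Instead of A's three set partitions (key intersection and two set differences, each driving its own comprehension, then a dict merge), B makes one accumulation pass over both dicts building a summed-values dict and a key-multiplicity counter, then partitions entries by multiplicity: count 2 gives the (already summed) intersection dict, count 1 gives the difference dict; no membership test against d1/d2 is ever made.
import Mathlib
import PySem

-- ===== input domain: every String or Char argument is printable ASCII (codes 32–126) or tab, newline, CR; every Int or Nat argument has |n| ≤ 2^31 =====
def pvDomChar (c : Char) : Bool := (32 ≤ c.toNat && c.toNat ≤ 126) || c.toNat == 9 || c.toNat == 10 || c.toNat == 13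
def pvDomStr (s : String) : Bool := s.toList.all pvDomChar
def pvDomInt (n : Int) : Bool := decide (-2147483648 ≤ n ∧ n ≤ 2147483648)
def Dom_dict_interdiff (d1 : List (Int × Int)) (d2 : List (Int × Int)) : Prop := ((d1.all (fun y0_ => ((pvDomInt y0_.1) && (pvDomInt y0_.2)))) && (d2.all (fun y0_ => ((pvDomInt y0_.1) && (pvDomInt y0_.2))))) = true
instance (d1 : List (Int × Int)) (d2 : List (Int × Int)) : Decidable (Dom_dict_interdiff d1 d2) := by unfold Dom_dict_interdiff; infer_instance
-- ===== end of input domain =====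

-- B replaces A's three set partitions with one summed-dict + key-multiplicity-counter pass and a
-- partition by multiplicity (objective: alternative); return-value equivalence only, no mutation.

-- ===== PORT A =====
def fA (a : Int) (b : Int) : Int := a + b

def dict_interdiff (d1 : List (Int × Int)) (d2 : List (Int × Int)) : (List (Int × Int)) × (List (Int × Int)) :=
  let D1 : PySem.Dict Int Int := PySem.Dict.mk d1
  let D2 : PySem.Dict Int Int := PySem.Dict.mk d2
  -- intersection = d1.keys() & d2.keys()
  let intersection := PySem.Set.inter (PySem.Set.ofList D1.keys) (PySem.Set.ofList D2.keys)
  -- for k in intersection: d_intersect[k] = f(d1[k], d2[k])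
  let d_intersect := intersection.foldl (fun d k => d.insert k (fA (D1.getD k 0) (D2.getD k 0))) PySem.Dict.empty
  -- diff1 = { k : d2[k] for k in set(d2) - set(d1) }
  let diff1 := (PySem.Set.diff (PySem.Set.ofList D2.keys) (PySem.Set.ofList D1.keys)).foldl
      (fun d k => d.insert k (D2.getD k 0)) PySem.Dict.empty
  -- diff2 = { k : d1[k] for k in set(d1) - set(d2) }
  let diff2 := (PySem.Set.diff (PySem.Set.ofList D1.keys) (PySem.Set.ofList D2.keys)).foldl
      (fun d k => d.insert k (D1.getD k 0)) PySem.Dict.empty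
  -- d_diff = {**diff1, **diff2}
  let d_diff := diff2.items.foldl (fun d p => d.insert p.1 p.2) diff1
  (d_intersect.items, d_diff.items)

-- ===== PORT B =====
def dict_interdiff_alt (d1 : List (Int × Int)) (d2 : List (Int × Int)) : (List (Int × Int)) × (List (Int × Int)) :=
  -- for d in (d2, d1): for k, v in d.items(): total[k] = total.get(k,0)+v; cnt[k] = cnt.get(k,0)+1
  let st := [d2, d1].foldl
      (fun (s : PySem.Dict Int Int × PySem.Dict Int Int) d =>
        d.foldl (fun s p => (s.1.insert p.1 (s.1.getD p.1 0 + p.2),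
                             s.2.insert p.1 (s.2.getD p.1 0 + 1))) s)
      (PySem.Dict.empty, PySem.Dict.empty)
  let total := st.1
  let cnt := st.2
  -- d_intersect = {k: total[k] for k in d1 if cnt[k] == 2}   (cnt[k], total[k]: k always present, getD exact)
  let d_intersect := (PySem.Dict.mk d1).keys.foldl
      (fun d k => if cnt.getD k 0 == 2 then d.insert k (total.getD k 0) else d) PySem.Dict.empty
  -- d_diff = {k: v for k, v in total.items() if cnt[k] == 1}
  let d_diff := total.items.foldl
      (fun d p => if cnt.getD p.1 0 == 1 then d.insert p.1 p.2 else d) PySem.Dict.empty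
  (d_intersect.items, d_diff.items)

-- ===== PRECONDITION & SPEC =====
-- Pre_ excludes association lists with duplicate keys: they do not denote any Python dict
-- (a Python dict always has unique keys), so A is never run on them.
def Pre_dict_interdiff (d1 : List (Int × Int)) (d2 : List (Int × Int)) : Prop :=
  (d1.map Prod.fst).Nodup ∧ (d2.map Prod.fst).Nodup
instance (d1 : List (Int × Int)) (d2 : List (Int × Int)) : Decidable (Pre_dict_interdiff d1 d2) := by unfold Pre_dict_interdiff; infer_instance

def pvWitness_dict_interdiff : (List (Int × Int)) × (List (Int × Int)) :=
  ([(1, 2), (3, 4), (-5, 6)], [(3, 5), (7, 1)])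

def Spec_dict_interdiff (d1 : List (Int × Int)) (d2 : List (Int × Int)) (out : (List (Int × Int)) × (List (Int × Int))) : Prop := out = dict_interdiff_alt d1 d2
instance (d1 : List (Int × Int)) (d2 : List (Int × Int)) (out : (List (Int × Int)) × (List (Int × Int))) : Decidable (Spec_dict_interdiff d1 d2 out) := by unfold Spec_dict_interdiff; infer_instance

-- ===== CLAIM (what is proved, stated in full; the proofs are below) =====
def Claim_equal_dict_interdiff : Prop := ∀ (d1 : List (Int × Int)) (d2 : List (Int × Int)), Dom_dict_interdiff d1 d2 → Pre_dict_interdiff d1 d2 → Spec_dict_interdiff d1 d2 (dict_interdiff d1 d2)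

-- ===== LEMMAS AND PROOFS =====

-- contains of any Dict, read off its items' keys
theorem pv_contains_eq (d : PySem.Dict Int Int) (k : Int) :
    d.contains k = decide (k ∈ d.items.map Prod.fst) := by
  simp only [PySem.Dict.contains]
  induction d.items with
  | nil => simp
  | cons p l ih =>
    simp only [List.any_cons, ih, List.map_cons, List.mem_cons]
    by_cases h : p.1 = k
    · simp [h]
    · simp [h, Ne.symm h]

-- guard-selected fresh keyed pairs append the filter
theorem pv_foldl_guard_insert (l : List (Int × Int)) (c : Int × Int → Bool) (d : PySem.Dict Int Int)
    (hn : (l.map Prod.fst).Nodup) (h : ∀ p ∈ l, d.contains p.1 = false) :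
    (l.foldl (fun d p => if c p then d.insert p.1 p.2 else d) d).items
      = d.items ++ l.filter c := by
  induction l generalizing d with
  | nil => simp
  | cons p l ih =>
    simp only [List.map_cons, List.nodup_cons] at hn
    by_cases hc : c p
    · have hdc : d.contains p.1 = false := h p (by simp)
      have h' : ∀ q ∈ l, (d.insert p.1 p.2).contains q.1 = false := by
        intro q hq
        have hne : q.1 ≠ p.1 := by
          intro he; exact hn.1 (he ▸ List.mem_map_of_mem hq)
        rw [PySem.Dict.contains_insert]
        simp [hne, h q (List.mem_cons_of_mem _ hq)]
      simp only [List.foldl_cons, if_pos hc]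
      rw [ih _ hn.2 h', PySem.Dict.items_insert_of_not_contains _ _ hdc,
        List.filter_cons_of_pos hc]
      simp
    · simp only [List.foldl_cons, if_neg hc]
      rw [ih _ hn.2 (fun q hq => h q (List.mem_cons_of_mem _ hq)),
        List.filter_cons_of_neg (by simpa using hc)]

theorem pv_foldl_insert_items (l : List (Int × Int)) (d : PySem.Dict Int Int)
    (hn : (l.map Prod.fst).Nodup) (h : ∀ p ∈ l, d.contains p.1 = false) :
    (l.foldl (fun d p => d.insert p.1 p.2) d).items = d.items ++ l := by
  have := pv_foldl_guard_insert l (fun _ => true) d hn h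
  simpa using this

-- looking up a key of a nodup association list returns its value
theorem pv_getD_mk (d : List (Int × Int)) (hn : (d.map Prod.fst).Nodup)
    (p : Int × Int) (hp : p ∈ d) : (PySem.Dict.mk d).getD p.1 0 = p.2 :=
  PySem.Dict.getD_of_mem_items _ hp hn 0

-- canonical value both ports reach (proof-only helper)
def pv_canon (d1 : List (Int × Int)) (d2 : List (Int × Int)) : (List (Int × Int)) × (List (Int × Int)) :=
  ((d1.filter (fun p => decide (p.1 ∈ d2.map Prod.fst))).map
      (fun p => (p.1, p.2 + (PySem.Dict.mk d2).getD p.1 0)),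
   (d2.filter (fun p => !decide (p.1 ∈ d1.map Prod.fst)))
     ++ (d1.filter (fun p => !decide (p.1 ∈ d2.map Prod.fst))))

-- keyed-comprehension loop: for k in keys: d[k] = V k
theorem pv_foldl_insert_keyed (l : List Int) (V : Int → Int) (d : PySem.Dict Int Int)
    (hn : l.Nodup) (h : ∀ k ∈ l, d.contains k = false) :
    (l.foldl (fun d k => d.insert k (V k)) d).items = d.items ++ l.map (fun k => (k, V k)) := by
  induction l generalizing d with
  | nil => simp
  | cons k l ih =>
    simp only [List.nodup_cons] at hn
    have hdc : d.contains k = false := h k (by simp)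
    have h' : ∀ q ∈ l, (d.insert k (V k)).contains q = false := by
      intro q hq
      rw [PySem.Dict.contains_insert]
      have hne : q ≠ k := fun he => hn.1 (he ▸ hq)
      simp [hne, h q (List.mem_cons_of_mem _ hq)]
    simp only [List.foldl_cons]
    rw [ih _ hn.2 h', PySem.Dict.items_insert_of_not_contains _ _ hdc]
    simp

-- guarded keyed-comprehension loop: for k in keys: if c k: d[k] = V k
theorem pv_foldl_guard_keyed (l : List Int) (c : Int → Bool) (V : Int → Int) (d : PySem.Dict Int Int)
    (hn : l.Nodup) (h : ∀ k ∈ l, d.contains k = false) :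
    (l.foldl (fun d k => if c k then d.insert k (V k) else d) d).items
      = d.items ++ (l.filter c).map (fun k => (k, V k)) := by
  induction l generalizing d with
  | nil => simp
  | cons k l ih =>
    simp only [List.nodup_cons] at hn
    by_cases hc : c k
    · have hdc : d.contains k = false := h k (by simp)
      have h' : ∀ q ∈ l, (d.insert k (V k)).contains q = false := by
        intro q hq
        rw [PySem.Dict.contains_insert]
        have hne : q ≠ k := fun he => hn.1 (he ▸ hq)
        simp [hne, h q (List.mem_cons_of_mem _ hq)]
      simp only [List.foldl_cons, if_pos hc]
      rw [ih _ hn.2 h', PySem.Dict.items_insert_of_not_contains _ _ hdc,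
        List.filter_cons_of_pos hc]
      simp
    · simp only [List.foldl_cons, if_neg hc]
      rw [ih _ hn.2 (fun q hq => h q (List.mem_cons_of_mem _ hq)),
        List.filter_cons_of_neg (by simpa using hc)]

-- the counter component of B's accumulation pass, read pointwise
theorem pv_getD_cntfold (l : List (Int × Int)) (c : PySem.Dict Int Int) (k : Int) :
    (l.foldl (fun d p => d.insert p.1 (d.getD p.1 0 + 1)) c).getD k 0
      = c.getD k 0 + ((l.map Prod.fst).count k : Int) := by
  induction l generalizing c with
  | nil => simp
  | cons p l ih =>
    simp only [List.foldl_cons, ih, List.map_cons]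
    rw [PySem.Dict.getD_insert]
    by_cases h : k = p.1
    · subst h
      rw [List.count_cons_self, if_pos rfl]
      push_cast; ring
    · rw [if_neg h, List.count_cons_of_ne (by omega)]

-- the summed-total component of B's accumulation pass
theorem pv_totfold (l : List (Int × Int)) (t : PySem.Dict Int Int)
    (hn : (l.map Prod.fst).Nodup) (hk : t.keys.Nodup) :
    (l.foldl (fun d p => d.insert p.1 (d.getD p.1 0 + p.2)) t).items
      = t.items.map (fun q => (q.1, q.2 + (PySem.Dict.mk l).getD q.1 0))
        ++ (l.filter (fun p => !t.contains p.1)).map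
             (fun p => (p.1, (PySem.Dict.mk l).getD p.1 0)) := by
  induction l generalizing t with
  | nil =>
    have h0 : ∀ x : Int, (PySem.Dict.mk ([] : List (Int × Int))).getD x 0 = 0 := by
      intro x
      apply PySem.Dict.getD_of_not_contains _ 0
      rw [pv_contains_eq]
      simp
    have hid : (fun q : Int × Int => (q.1, q.2 + (PySem.Dict.mk ([] : List (Int × Int))).getD q.1 0)) = id := by
      funext q
      cases q
      simp [h0]
    simp [hid]
  | cons p l ih =>
    simp only [List.map_cons, List.nodup_cons] at hn
    have hpl : p.1 ∉ l.map Prod.fst := hn.1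
    have hmk : ∀ x : Int, (PySem.Dict.mk (p :: l)).getD x 0
        = if p.1 = x then p.2 else (PySem.Dict.mk l).getD x 0 := by
      intro x
      rw [PySem.Dict.getD_eq_get?_getD, PySem.Dict.get?_mk_cons]
      by_cases h : p.1 = x
      · rw [if_pos (by simp [h]), if_pos h]
        rfl
      · rw [if_neg (by simp [h]), if_neg h, PySem.Dict.getD_eq_get?_getD]
    have hmkl0 : (PySem.Dict.mk l).getD p.1 0 = 0 := by
      apply PySem.Dict.getD_of_not_contains _ 0
      rw [pv_contains_eq]
      simpa using hpl
    simp only [List.foldl_cons]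
    rw [ih _ hn.2 (PySem.Dict.nodup_keys_insert _ _ _ hk)]
    have hcongr_fil : ∀ w : Int, l.filter (fun q => !(t.insert p.1 w).contains q.1)
        = l.filter (fun q => !t.contains q.1) := by
      intro w
      apply List.filter_congr
      intro q hq
      have hne : q.1 ≠ p.1 := fun he => hpl (he ▸ List.mem_map_of_mem hq)
      rw [PySem.Dict.contains_insert]
      simp [hne]
    have hval2 : ∀ q ∈ l.filter (fun q => !t.contains q.1),
        ((q : Int × Int).1, (PySem.Dict.mk l).getD q.1 0)
          = (q.1, (PySem.Dict.mk (p :: l)).getD q.1 0) := by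
      intro q hq
      have hne : q.1 ≠ p.1 := fun he => hpl (he ▸ List.mem_map_of_mem (List.mem_of_mem_filter hq))
      rw [hmk, if_neg (Ne.symm hne)]
    by_cases hc : t.contains p.1 = true
    · rw [PySem.Dict.items_insert_of_contains _ _ hc, hcongr_fil, List.map_map,
        List.filter_cons_of_neg (by simp [hc])]
      congr 1
      · apply List.map_congr_left
        intro q hq
        simp only [Function.comp_apply]
        by_cases h : q.1 = p.1
        · have hq' : (q.1, q.2) ∈ t.items := hq
          have hq2 : t.getD q.1 0 = q.2 := PySem.Dict.getD_of_mem_items _ hq' hk 0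
          rw [if_pos (by simp [h]), hmkl0, hmk, if_pos h.symm, ← h, hq2]
          simp
        · rw [if_neg (by simp [h]), hmk, if_neg (fun he => h he.symm)]
      · exact List.map_congr_left hval2
    · have hc' : t.contains p.1 = false := by simpa using hc
      rw [PySem.Dict.items_insert_of_not_contains _ _ hc',
        PySem.Dict.getD_of_not_contains _ 0 hc', hcongr_fil, List.map_append,
        List.filter_cons_of_pos (by simp [hc'])]
      have hmt : t.items.map (fun q => (q.1, q.2 + (PySem.Dict.mk l).getD q.1 0))
          = t.items.map (fun q => (q.1, q.2 + (PySem.Dict.mk (p :: l)).getD q.1 0)) := by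
        apply List.map_congr_left
        intro q hq
        have hne : q.1 ≠ p.1 := by
          intro he
          have hct : t.contains q.1 = true := by
            rw [pv_contains_eq]
            exact decide_eq_true (List.mem_map_of_mem hq)
          rw [he, hc'] at hct
          exact Bool.noConfusion hct
        rw [hmk, if_neg (Ne.symm hne)]
      have hmv : (l.filter (fun q => !t.contains q.1)).map
            (fun r : Int × Int => (r.1, (PySem.Dict.mk l).getD r.1 0))
          = (l.filter (fun q => !t.contains q.1)).map
            (fun r : Int × Int => (r.1, (PySem.Dict.mk (p :: l)).getD r.1 0)) :=
        List.map_congr_left hval2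
      rw [hmt, hmv, List.append_assoc]
      simp only [List.map_cons, List.map_nil]
      congr 1
      simp [hmk, hmkl0]

theorem pv_A_eq (d1 d2 : List (Int × Int)) (hn1 : (d1.map Prod.fst).Nodup)
    (hn2 : (d2.map Prod.fst).Nodup) : dict_interdiff d1 d2 = pv_canon d1 d2 := by
  simp only [dict_interdiff, pv_canon]
  have hk1 : (PySem.Dict.mk d1 : PySem.Dict Int Int).keys = d1.map Prod.fst := rfl
  have hk2 : (PySem.Dict.mk d2 : PySem.Dict Int Int).keys = d2.map Prod.fst := rfl
  rw [hk1, hk2, PySem.Set.ofList_eq_self_of_nodup _ hn1, PySem.Set.ofList_eq_self_of_nodup _ hn2]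
  have hinter : PySem.Set.inter (d1.map Prod.fst) (d2.map Prod.fst)
      = (d1.map Prod.fst).filter (fun k => decide (k ∈ d2.map Prod.fst)) := by
    show (d1.map Prod.fst).filter (fun k => (d2.map Prod.fst).contains k) = _
    simp [List.contains_eq_mem]
  have hdiff21 : PySem.Set.diff (d2.map Prod.fst) (d1.map Prod.fst)
      = (d2.map Prod.fst).filter (fun k => !decide (k ∈ d1.map Prod.fst)) := by
    show (d2.map Prod.fst).filter (fun k => !(d1.map Prod.fst).contains k) = _
    simp [List.contains_eq_mem]
  have hdiff12 : PySem.Set.diff (d1.map Prod.fst) (d2.map Prod.fst)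
      = (d1.map Prod.fst).filter (fun k => !decide (k ∈ d2.map Prod.fst)) := by
    show (d1.map Prod.fst).filter (fun k => !(d2.map Prod.fst).contains k) = _
    simp [List.contains_eq_mem]
  rw [hinter, hdiff21, hdiff12]
  have hemp : ∀ k : Int, (PySem.Dict.empty : PySem.Dict Int Int).contains k = false := by
    intro k; simp [pysem]
  have hnI : ((d1.map Prod.fst).filter (fun k => decide (k ∈ d2.map Prod.fst))).Nodup := hn1.filter _
  have hn21 : ((d2.map Prod.fst).filter (fun k => !decide (k ∈ d1.map Prod.fst))).Nodup := hn2.filter _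
  have hn12 : ((d1.map Prod.fst).filter (fun k => !decide (k ∈ d2.map Prod.fst))).Nodup := hn1.filter _
  simp only [Prod.mk.injEq]
  constructor
  · rw [pv_foldl_insert_keyed _ _ _ hnI (fun k _ => hemp k), List.filter_map, List.map_map]
    show [] ++ _ = _
    rw [List.nil_append]
    apply List.map_congr_left
    intro p hp
    have hp1 : p ∈ d1 := (List.mem_filter.mp hp).1
    simp [fA, pv_getD_mk d1 hn1 p hp1]
  · have hd21 : (((d2.map Prod.fst).filter (fun k => !decide (k ∈ d1.map Prod.fst))).foldl
        (fun d k => d.insert k ((PySem.Dict.mk d2 : PySem.Dict Int Int).getD k 0)) PySem.Dict.empty).items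
        = d2.filter (fun p => !decide (p.1 ∈ d1.map Prod.fst)) := by
      rw [pv_foldl_insert_keyed _ _ _ hn21 (fun k _ => hemp k), List.filter_map, List.map_map]
      show [] ++ _ = _
      rw [List.nil_append]
      simp only [Function.comp_def]
      have hcg : ∀ p ∈ d2.filter (fun p => !decide (p.1 ∈ d1.map Prod.fst)),
          (fun (p : Int × Int) => (p.1, (PySem.Dict.mk d2 : PySem.Dict Int Int).getD p.1 0)) p = id p := by
        intro p hp
        have hp2 : p ∈ d2 := (List.mem_filter.mp hp).1
        simp [pv_getD_mk d2 hn2 p hp2]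
      rw [List.map_congr_left hcg, List.map_id]
    have hd12 : (((d1.map Prod.fst).filter (fun k => !decide (k ∈ d2.map Prod.fst))).foldl
        (fun d k => d.insert k ((PySem.Dict.mk d1 : PySem.Dict Int Int).getD k 0)) PySem.Dict.empty).items
        = d1.filter (fun p => !decide (p.1 ∈ d2.map Prod.fst)) := by
      rw [pv_foldl_insert_keyed _ _ _ hn12 (fun k _ => hemp k), List.filter_map, List.map_map]
      show [] ++ _ = _
      rw [List.nil_append]
      simp only [Function.comp_def]
      have hcg : ∀ p ∈ d1.filter (fun p => !decide (p.1 ∈ d2.map Prod.fst)),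
          (fun (p : Int × Int) => (p.1, (PySem.Dict.mk d1 : PySem.Dict Int Int).getD p.1 0)) p = id p := by
        intro p hp
        have hp1 : p ∈ d1 := (List.mem_filter.mp hp).1
        simp [pv_getD_mk d1 hn1 p hp1]
      rw [List.map_congr_left hcg, List.map_id]
    rw [hd12]
    have hnn : ((d1.filter (fun p => !decide (p.1 ∈ d2.map Prod.fst))).map Prod.fst).Nodup :=
      hn1.sublist (List.Sublist.map Prod.fst List.filter_sublist)
    have hfresh : ∀ p ∈ d1.filter (fun p => !decide (p.1 ∈ d2.map Prod.fst)),
        (((d2.map Prod.fst).filter (fun k => !decide (k ∈ d1.map Prod.fst))).foldl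
          (fun d k => d.insert k ((PySem.Dict.mk d2 : PySem.Dict Int Int).getD k 0)) PySem.Dict.empty).contains p.1 = false := by
      intro p hp
      have hp1 : p.1 ∈ d1.map Prod.fst := List.mem_map_of_mem (List.mem_filter.mp hp).1
      rw [pv_contains_eq, hd21]
      simp only [decide_eq_false_iff_not]
      intro hmem
      rcases List.mem_map.mp hmem with ⟨q, hq, hq1⟩
      have := (List.mem_filter.mp hq).2
      rw [hq1] at this
      simp [hp1] at this
    rw [pv_foldl_insert_items _ _ hnn hfresh, hd21]

theorem pv_B_eq (d1 d2 : List (Int × Int)) (hn1 : (d1.map Prod.fst).Nodup)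
    (hn2 : (d2.map Prod.fst).Nodup) : dict_interdiff_alt d1 d2 = pv_canon d1 d2 := by
  simp only [dict_interdiff_alt, pv_canon, List.foldl_cons, List.foldl_nil]
  have e2 := PySem.List.foldl_prod_mk
      (f := fun (d : PySem.Dict Int Int) (p : Int × Int) => d.insert p.1 (d.getD p.1 0 + p.2))
      (g := fun (d : PySem.Dict Int Int) (p : Int × Int) => d.insert p.1 (d.getD p.1 0 + 1))
      (l := d2) (a := PySem.Dict.empty) (b := PySem.Dict.empty)
  have e1 := PySem.List.foldl_prod_mk
      (f := fun (d : PySem.Dict Int Int) (p : Int × Int) => d.insert p.1 (d.getD p.1 0 + p.2))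
      (g := fun (d : PySem.Dict Int Int) (p : Int × Int) => d.insert p.1 (d.getD p.1 0 + 1))
      (l := d1)
      (a := d2.foldl (fun (d : PySem.Dict Int Int) (p : Int × Int) => d.insert p.1 (d.getD p.1 0 + p.2)) PySem.Dict.empty)
      (b := d2.foldl (fun (d : PySem.Dict Int Int) (p : Int × Int) => d.insert p.1 (d.getD p.1 0 + 1)) PySem.Dict.empty)
  simp only [e2, e1]
  have hcntD : ∀ k : Int,
      (d1.foldl (fun (d : PySem.Dict Int Int) (p : Int × Int) => d.insert p.1 (d.getD p.1 0 + 1))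
        (d2.foldl (fun (d : PySem.Dict Int Int) (p : Int × Int) => d.insert p.1 (d.getD p.1 0 + 1)) PySem.Dict.empty)).getD k 0
      = (if k ∈ d2.map Prod.fst then (1 : Int) else 0) + (if k ∈ d1.map Prod.fst then 1 else 0) := by
    intro k
    rw [pv_getD_cntfold, pv_getD_cntfold, PySem.Dict.getD_empty]
    have h2 : ((d2.map Prod.fst).count k : Int) = if k ∈ d2.map Prod.fst then 1 else 0 := by
      by_cases h : k ∈ d2.map Prod.fst
      · rw [if_pos h, List.count_eq_one_of_mem hn2 h]; rfl
      · rw [if_neg h, List.count_eq_zero_of_not_mem h]; rfl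
    have h1 : ((d1.map Prod.fst).count k : Int) = if k ∈ d1.map Prod.fst then 1 else 0 := by
      by_cases h : k ∈ d1.map Prod.fst
      · rw [if_pos h, List.count_eq_one_of_mem hn1 h]; rfl
      · rw [if_neg h, List.count_eq_zero_of_not_mem h]; rfl
    rw [h1, h2]; ring
  have hph1 : d2.foldl (fun d p => d.insert p.1 (d.getD p.1 0 + p.2)) PySem.Dict.empty
      = PySem.Dict.mk d2 := by
    apply PySem.Dict.ext
    rw [pv_totfold d2 PySem.Dict.empty hn2 (by simp [pysem])]
    have hfe : d2.filter (fun p => !(PySem.Dict.empty : PySem.Dict Int Int).contains p.1) = d2 := by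
      apply List.filter_eq_self.mpr
      intro p _
      simp [pysem]
    rw [hfe]
    have : ∀ p ∈ d2, ((fun p : Int × Int => (p.1, (PySem.Dict.mk d2).getD p.1 0)) p) = id p := by
      intro p hp
      simp [pv_getD_mk d2 hn2 p hp]
    rw [List.map_congr_left this, List.map_id,
      show (PySem.Dict.empty : PySem.Dict Int Int).items = [] from rfl]
    rfl
  rw [hph1]
  have hmk2keys : (PySem.Dict.mk d2 : PySem.Dict Int Int).keys = d2.map Prod.fst := rfl
  have htot : (d1.foldl (fun d p => d.insert p.1 (d.getD p.1 0 + p.2)) (PySem.Dict.mk d2)).items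
      = d2.map (fun q => (q.1, q.2 + (PySem.Dict.mk d1).getD q.1 0))
        ++ d1.filter (fun p => !decide (p.1 ∈ d2.map Prod.fst)) := by
    rw [pv_totfold d1 (PySem.Dict.mk d2) hn1 (by rw [hmk2keys]; exact hn2)]
    have hfc : d1.filter (fun p => !(PySem.Dict.mk d2 : PySem.Dict Int Int).contains p.1)
        = d1.filter (fun p => !decide (p.1 ∈ d2.map Prod.fst)) := by
      apply List.filter_congr
      intro p _
      rw [pv_contains_eq]
    rw [hfc]
    congr 1
    have : ∀ p ∈ d1.filter (fun p => !decide (p.1 ∈ d2.map Prod.fst)),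
        ((fun p : Int × Int => (p.1, (PySem.Dict.mk d1).getD p.1 0)) p) = id p := by
      intro p hp
      simp [pv_getD_mk d1 hn1 p (List.mem_of_mem_filter hp)]
    rw [List.map_congr_left this, List.map_id]
  have hnodtot : ((d2.map (fun q => (q.1, q.2 + (PySem.Dict.mk d1).getD q.1 0))
        ++ d1.filter (fun p => !decide (p.1 ∈ d2.map Prod.fst))).map Prod.fst).Nodup := by
    rw [List.map_append, List.map_map]
    have hcomp : (Prod.fst ∘ fun q : Int × Int => (q.1, q.2 + (PySem.Dict.mk d1).getD q.1 0)) = Prod.fst := by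
      funext q; rfl
    rw [hcomp]
    apply List.Nodup.append hn2
      (hn1.sublist (List.Sublist.map Prod.fst List.filter_sublist))
    intro k hk2 hk1
    rcases List.mem_map.mp hk1 with ⟨q, hq, hq1⟩
    have := (List.mem_filter.mp hq).2
    rw [hq1] at this
    simp [hk2] at this
  have htkeys : (d1.foldl (fun d p => d.insert p.1 (d.getD p.1 0 + p.2)) (PySem.Dict.mk d2)).keys.Nodup := by
    show ((d1.foldl (fun d p => d.insert p.1 (d.getD p.1 0 + p.2)) (PySem.Dict.mk d2)).items.map Prod.fst).Nodup
    rw [htot]; exact hnodtot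
  have hemp : ∀ k : Int, (PySem.Dict.empty : PySem.Dict Int Int).contains k = false := by
    intro k; simp [pysem]
  simp only [Prod.mk.injEq]
  constructor
  · -- intersection component
    rw [show (PySem.Dict.mk d1 : PySem.Dict Int Int).keys = d1.map Prod.fst from rfl,
      pv_foldl_guard_keyed (d1.map Prod.fst) _ _ _ hn1 (fun k _ => hemp k),
      show (PySem.Dict.empty : PySem.Dict Int Int).items = [] from rfl, List.nil_append]
    have hfc : (d1.map Prod.fst).filter
          (fun k => (d1.foldl (fun (d : PySem.Dict Int Int) (p : Int × Int) => d.insert p.1 (d.getD p.1 0 + 1))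
            (d2.foldl (fun (d : PySem.Dict Int Int) (p : Int × Int) => d.insert p.1 (d.getD p.1 0 + 1)) PySem.Dict.empty)).getD k 0 == 2)
        = (d1.map Prod.fst).filter (fun k => decide (k ∈ d2.map Prod.fst)) := by
      apply List.filter_congr
      intro k hk
      simp only [hcntD]
      rw [if_pos hk]
      by_cases h : k ∈ d2.map Prod.fst
      · rw [if_pos h]; simp [h]
      · rw [if_neg h]; simp [h]
    rw [hfc, List.filter_map, List.map_map]
    apply List.map_congr_left
    intro p hp
    have hp1 : p ∈ d1 := (List.mem_filter.mp hp).1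
    have hpmem : p.1 ∈ d2.map Prod.fst := by
      have := (List.mem_filter.mp hp).2
      simpa using this
    rcases List.mem_map.mp hpmem with ⟨q, hq, hq1⟩
    have hq2 : (PySem.Dict.mk d2).getD p.1 0 = q.2 := by
      rw [← hq1]; exact pv_getD_mk d2 hn2 q hq
    have hentry : (p.1, q.2 + p.2) ∈
        (d1.foldl (fun d p => d.insert p.1 (d.getD p.1 0 + p.2)) (PySem.Dict.mk d2)).items := by
      rw [htot]
      apply List.mem_append_left
      have : (q.1, q.2 + (PySem.Dict.mk d1).getD q.1 0) ∈
          d2.map (fun q => (q.1, q.2 + (PySem.Dict.mk d1).getD q.1 0)) := List.mem_map_of_mem hq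
      rwa [hq1, pv_getD_mk d1 hn1 p hp1] at this
    have hgd : (d1.foldl (fun d p => d.insert p.1 (d.getD p.1 0 + p.2)) (PySem.Dict.mk d2)).getD p.1 0
        = q.2 + p.2 := PySem.Dict.getD_of_mem_items _ hentry htkeys 0
    simp only [Function.comp_apply, hgd, hq2]
    rw [add_comm]
  · -- difference component
    rw [pv_foldl_guard_insert _ _ _ (by rw [htot]; exact hnodtot) (fun p _ => hemp p.1),
      show (PySem.Dict.empty : PySem.Dict Int Int).items = [] from rfl,
      List.nil_append, htot, List.filter_append]
    congr 1
    · rw [List.filter_map]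
      have hfc : d2.filter ((fun p : Int × Int =>
            (d1.foldl (fun (d : PySem.Dict Int Int) (p : Int × Int) => d.insert p.1 (d.getD p.1 0 + 1))
              (d2.foldl (fun (d : PySem.Dict Int Int) (p : Int × Int) => d.insert p.1 (d.getD p.1 0 + 1)) PySem.Dict.empty)).getD p.1 0 == 1)
            ∘ (fun q : Int × Int => (q.1, q.2 + (PySem.Dict.mk d1).getD q.1 0)))
          = d2.filter (fun p => !decide (p.1 ∈ d1.map Prod.fst)) := by
        apply List.filter_congr
        intro q hq
        simp only [Function.comp_apply]
        simp only [hcntD]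
        rw [if_pos (List.mem_map_of_mem hq)]
        by_cases h : q.1 ∈ d1.map Prod.fst
        · rw [if_pos h]; simp [h]
        · rw [if_neg h]; simp [h]
      rw [hfc]
      have : ∀ q ∈ d2.filter (fun p => !decide (p.1 ∈ d1.map Prod.fst)),
          ((fun q : Int × Int => (q.1, q.2 + (PySem.Dict.mk d1).getD q.1 0)) q) = id q := by
        intro q hq
        have hq1 : q.1 ∉ d1.map Prod.fst := by
          have := (List.mem_filter.mp hq).2
          simpa using this
        have h0 : (PySem.Dict.mk d1).getD q.1 0 = 0 := by
          apply PySem.Dict.getD_of_not_contains _ 0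
          rw [pv_contains_eq]
          simpa using hq1
        simp [h0]
      rw [List.map_congr_left this, List.map_id]
    · apply List.filter_eq_self.mpr
      intro p hp
      have hp2 : p.1 ∉ d2.map Prod.fst := by
        have := (List.mem_filter.mp hp).2
        simpa using this
      have hp1 : p.1 ∈ d1.map Prod.fst :=
        List.mem_map_of_mem (List.mem_of_mem_filter hp)
      simp only [hcntD]
      rw [if_pos hp1, if_neg hp2]
      simp

-- ===== VERDICT (by name: the statement is the Claim_ definition above) =====
theorem dict_interdiff_spec : Claim_equal_dict_interdiff := by
  intro d1 d2 _ hpre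
  unfold Spec_dict_interdiff
  rw [pv_A_eq d1 d2 hpre.1 hpre.2, pv_B_eq d1 d2 hpre.1 hpre.2]
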